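-- pv_equiv track=rewrite | github.com/keguihua/autorunne | src/autorunne/core/templater.py | _render_commands
-- ===== SOURCE A (Python) =====
-- def _render_commands(commands: dict) -> str:
--     ordered = [
--         ("run", "Run"),
--         ("test", "Test"),
--         ("build", "Build"),
--         ("configure", "Configure"),
--     ]
--     lines = []
--     rendered_keys = set()
--     for key, label in ordered:
--         value = commands.get(key)
--         if value:
--             lines.append(f"- **{label}:** `{value}`")
--             rendered_keys.add(key)
--     for key in sorted(k for k in commands if k not in rendered_keys):
--         value = commands.get(key)
--         if value:
--             lines.append(f"- **{key}:** `{value}`")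
--     if not lines:
--         lines.append("- No reliable run/test/build commands detected yet. Confirm them manually.")
--     return "\n".join(lines)
-- ===== SOURCE B (Python) =====
-- def _render_commands(commands: dict) -> str:
--     labels = {"run": "Run", "test": "Test", "build": "Build", "configure": "Configure"}
--     priority = {key: rank for rank, key in enumerate(labels)}
--     ordered_keys = sorted(commands, key=lambda k: (priority.get(k, len(labels)), k))
--     lines = [
--         f"- **{labels.get(k, k)}:** `{commands[k]}`"
--         for k in ordered_keys
--         if commands[k]
--     ]
--     if lines:
--         return "\n".join(lines)
--     return "- No reliable run/test/build commands detected yet. Confirm them manually."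
-- ===== Notes on version B (the rewrite author's own statement) =====
-- stated objective: alternative
-- what changed: B computes one sorted order of ALL keys under the composite key (priority.get(k, 4), k) and renders in a single filter+map pass, replacing A's two staged appending loops coordinated through a mutable rendered_keys set plus a separate sort of the leftovers.
import Mathlib
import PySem

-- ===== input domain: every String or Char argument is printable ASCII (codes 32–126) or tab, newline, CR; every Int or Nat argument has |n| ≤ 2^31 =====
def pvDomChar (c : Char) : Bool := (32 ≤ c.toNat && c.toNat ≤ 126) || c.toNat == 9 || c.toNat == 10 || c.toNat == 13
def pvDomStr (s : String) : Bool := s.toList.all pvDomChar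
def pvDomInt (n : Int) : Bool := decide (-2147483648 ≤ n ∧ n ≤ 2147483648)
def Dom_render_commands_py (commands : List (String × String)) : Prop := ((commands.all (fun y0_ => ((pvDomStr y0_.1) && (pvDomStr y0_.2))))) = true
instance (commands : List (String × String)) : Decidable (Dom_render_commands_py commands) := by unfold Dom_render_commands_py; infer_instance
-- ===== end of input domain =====

-- B replaces A's two staged appending loops (fixed-order scan with a mutable rendered-keys set,
-- then a sort of the leftovers) by ONE sort of all keys under the composite key
-- (priority.get(k, 4), k) followed by a single filter+map rendering pass.


-- the f-string `- **{label}:** \`{value}\`` (shared formatting helper of both ports)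
def pvLine (label value : String) : String := "- **" ++ label ++ ":** `" ++ value ++ "`"

def pvFallback : String := "- No reliable run/test/build commands detected yet. Confirm them manually."

-- ===== PORT A =====
def render_commands_py (commands : List (String × String)) : String :=
  let d := PySem.Dict.ofList commands
  let ordered : List (String × String) :=
    [("run", "Run"), ("test", "Test"), ("build", "Build"), ("configure", "Configure")]
  -- first loop: lines and rendered_keys accumulated together
  let st := ordered.foldl
    (fun (st : List String × PySem.Set String) kl =>
      match d.get? kl.1 with
      | some v => if v == "" then st
                  else (st.1 ++ [pvLine kl.2 v], PySem.Set.add st.2 kl.1)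
      | none => st)
    ([], PySem.Set.empty)
  -- second loop over the alphabetically sorted not-yet-rendered keys
  let restKeys := PySem.List.sorted (d.keys.filter (fun k => !(PySem.Set.contains st.2 k))) (fun k => k) false
  let lines := restKeys.foldl
    (fun acc k =>
      match d.get? k with
      | some v => if v == "" then acc else acc ++ [pvLine k v]
      | none => acc)
    st.1
  let lines := if lines = [] then [pvFallback] else lines
  PySem.Str.join "\n" lines

-- ===== PORT B =====
-- labels = {"run": "Run", "test": "Test", "build": "Build", "configure": "Configure"}
def pvLabels : PySem.Dict String String := PySem.Dict.ofList
  [("run", "Run"), ("test", "Test"), ("build", "Build"), ("configure", "Configure")]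

-- priority = {key: rank for rank, key in enumerate(labels)}
def pvPriority : PySem.Dict String Int :=
  PySem.Dict.ofList ((PySem.List.enumerate pvLabels.keys).map (fun p => (p.2, p.1)))

-- lambda k: priority.get(k, len(labels))  (the first component of the sort key)
def pvPrio : String → Int := fun k => pvPriority.getD k (PySem.List.len pvLabels.keys)

def render_commands_py_alt (commands : List (String × String)) : String :=
  let d := PySem.Dict.ofList commands
  -- ordered_keys = sorted(commands, key=lambda k: (priority.get(k, len(labels)), k))
  let orderedKeys := PySem.List.sorted2 d.keys pvPrio (fun k => k) false
  -- single filter+map rendering pass (`commands[k]` on a present key = d.getD k "")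
  let lines := (orderedKeys.filter (fun k => !(d.getD k "" == ""))).map
      (fun k => pvLine (pvLabels.getD k k) (d.getD k ""))
  if lines = [] then pvFallback
  else PySem.Str.join "\n" lines

-- ===== PRECONDITION & SPEC =====
def Spec_render_commands_py (commands : List (String × String)) (out : String) : Prop := out = render_commands_py_alt commands
instance (commands : List (String × String)) (out : String) : Decidable (Spec_render_commands_py commands out) := by unfold Spec_render_commands_py; infer_instance

-- ===== CLAIM (what is proved, stated in full; the proofs are below) =====
def Claim_equal_render_commands_py : Prop := ∀ (commands : List (String × String)), Dom_render_commands_py commands → Spec_render_commands_py commands (render_commands_py commands)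

-- ===== LEMMAS AND PROOFS =====

-- "the value at k is truthy": commands.get(k) is present and non-empty
def pvT (d : PySem.Dict String String) (k : String) : Bool := !(d.getD k "" == "")

def pvKeysLit : List String := ["run", "test", "build", "configure"]

def pvOrderedLit : List (String × String) :=
  [("run", "Run"), ("test", "Test"), ("build", "Build"), ("configure", "Configure")]

theorem pvOrderedLit_def : pvOrderedLit
    = [("run", "Run"), ("test", "Test"), ("build", "Build"), ("configure", "Configure")] := rfl

-- the common tail: A wraps the fallback into the list before joining, B branches on the list
theorem pvFinish (L : List String) :
    PySem.Str.join "\n" (if L = [] then [pvFallback] else L)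
      = if L = [] then pvFallback else PySem.Str.join "\n" L := by
  by_cases h : L = []
  · rw [if_pos h, if_pos h]
    rfl
  · rw [if_neg h, if_neg h]

-- truthy implies present
theorem pvT_contains (d : PySem.Dict String String) (k : String) (h : pvT d k = true) :
    d.contains k = true := by
  rw [PySem.Dict.contains_eq_isSome_get?]
  cases hg : d.get? k with
  | none =>
    exfalso
    have hget : d.getD k "" = "" := by simp [PySem.Dict.getD_eq_get?_getD, hg]
    simp [pvT, hget] at h
  | some v => rfl

-- A's first loop computed in closed form
theorem pvFoldA (d : PySem.Dict String String) (ps : List (String × String))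
    (acc : List String) (s : PySem.Set String) :
    ps.foldl
      (fun (st : List String × PySem.Set String) kl =>
        match d.get? kl.1 with
        | some v => if v == "" then st
                    else (st.1 ++ [pvLine kl.2 v], PySem.Set.add st.2 kl.1)
        | none => st)
      (acc, s)
    = (acc ++ (ps.filter (fun kl => pvT d kl.1)).map (fun kl => pvLine kl.2 (d.getD kl.1 "")),
       ps.foldl (fun s kl => if pvT d kl.1 then PySem.Set.add s kl.1 else s) s) := by
  induction ps generalizing acc s with
  | nil => simp
  | cons kl t ih =>
    simp only [List.foldl_cons, List.filter_cons]
    cases hg : d.get? kl.1 with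
    | none =>
      have hget : d.getD kl.1 "" = "" := by simp [PySem.Dict.getD_eq_get?_getD, hg]
      have hT : pvT d kl.1 = false := by simp [pvT, hget]
      simp only [hT, Bool.false_eq_true, if_false]
      simpa using ih acc s
    | some v =>
      have hget : d.getD kl.1 "" = v := by simp [PySem.Dict.getD_eq_get?_getD, hg]
      by_cases hv : v = ""
      · have hT : pvT d kl.1 = false := by simp [pvT, hget, hv]
        simp only [hT, hv, Bool.false_eq_true, if_false]
        simpa using ih acc s
      · have hT : pvT d kl.1 = true := by simp [pvT, hget, hv]
        simp only [hT, if_true]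
        have hvb : (v == "") = false := by simp [hv]
        simp only [hvb, Bool.false_eq_true, if_false]
        simpa [hget] using ih (acc ++ [pvLine kl.2 v]) (PySem.Set.add s kl.1)

-- membership in the rendered-keys set built by A's first loop
theorem pvMemFoldSet (d : PySem.Dict String String) (ps : List (String × String))
    (s : PySem.Set String) (k : String) :
    k ∈ ps.foldl (fun s kl => if pvT d kl.1 then PySem.Set.add s kl.1 else s) s
      ↔ k ∈ s ∨ ∃ kl ∈ ps, pvT d kl.1 = true ∧ k = kl.1 := by
  induction ps generalizing s with
  | nil => simp
  | cons kl t ih =>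
    simp only [List.foldl_cons]
    by_cases hT : pvT d kl.1 = true
    · rw [hT, if_pos rfl, ih]
      rw [PySem.Set.mem_add s kl.1 k]
      constructor
      · rintro ((h | h) | h)
        · exact Or.inl h
        · exact Or.inr ⟨kl, by simp, hT, h⟩
        · obtain ⟨x, hx, hx2⟩ := h
          exact Or.inr ⟨x, by simp [hx], hx2⟩
      · rintro (h | ⟨x, hx, hx1, hx2⟩)
        · exact Or.inl (Or.inl h)
        · rcases List.mem_cons.mp hx with h | h
          · exact Or.inl (Or.inr (h ▸ hx2))
          · exact Or.inr ⟨x, h, hx1, hx2⟩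
    · rw [if_neg hT, ih]
      constructor
      · rintro (h | ⟨x, hx, hx1, hx2⟩)
        · exact Or.inl h
        · exact Or.inr ⟨x, by simp [hx], hx1, hx2⟩
      · rintro (h | ⟨x, hx, hx1, hx2⟩)
        · exact Or.inl h
        · rcases List.mem_cons.mp hx with h | h
          · exact absurd (h ▸ hx1) hT
          · exact Or.inr ⟨x, h, hx1, hx2⟩

-- A's second loop body, rewritten as the standard append-if shape
theorem pvRestStep (d : PySem.Dict String String) :
    (fun (acc : List String) k =>
      match d.get? k with
      | some v => if v == "" then acc else acc ++ [pvLine k v]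
      | none => acc)
    = fun (acc : List String) k =>
        if pvT d k then acc ++ [pvLine k (d.getD k "")] else acc := by
  funext acc k
  cases hg : d.get? k with
  | none =>
    have hget : d.getD k "" = "" := by simp [PySem.Dict.getD_eq_get?_getD, hg]
    simp [pvT, hget]
  | some v =>
    have hget : d.getD k "" = v := by simp [PySem.Dict.getD_eq_get?_getD, hg]
    by_cases hv : v = "" <;> simp [pvT, hget, hv]

-- sorting a filtered Nodup list = filtering the sorted list
theorem pvSortedFilter (xs : List String) (p : String → Bool) (h : xs.Nodup) :
    PySem.List.sorted (xs.filter p) (fun k => k) false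
      = (PySem.List.sorted xs (fun k => k) false).filter p := by
  apply PySem.List.sorted_eq_of_perm_of_pairwise_lt
  · exact (PySem.List.sorted_perm xs (fun k => k) false).filter p
  · have hle : (PySem.List.sorted xs (fun k => k) false).Pairwise (fun a b => a ≤ b) :=
      PySem.List.sorted_pairwise xs (fun k => k)
    have hnd : (PySem.List.sorted xs (fun k => k) false).Nodup :=
      ((PySem.List.sorted_perm xs (fun k => k) false).symm).nodup h
    have hlt : (PySem.List.sorted xs (fun k => k) false).Pairwise (fun a b => a < b) :=
      (hle.and hnd).imp (fun h => lt_of_le_of_ne h.1 h.2)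
    exact hlt.sublist List.filter_sublist

-- dropping an inner filter implied by the outer one
theorem pvFilterOfImp (l : List String) (p q : String → Bool)
    (h : ∀ k, q k = true → p k = true) : (l.filter p).filter q = l.filter q := by
  induction l with
  | nil => rfl
  | cons a t ih =>
    cases hq : q a with
    | true => simp [hq, h a hq, ih]
    | false => cases hp : p a <;> simp [hq, hp, ih]

-- two pre-filters that agree on truthy keys give the same truthy-filtered list
theorem pvFilterFilterCongr (l : List String) (p q t : String → Bool)
    (h : ∀ k ∈ l, t k = true → p k = q k) :
    (l.filter p).filter t = (l.filter q).filter t := by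
  induction l with
  | nil => rfl
  | cons a tl ih =>
    have ih' := ih (fun k hk => h k (List.mem_cons_of_mem a hk))
    cases ht : t a with
    | true =>
      have hpq : p a = q a := h a (List.mem_cons_self) ht
      cases hp : p a <;> simp [hp, hpq ▸ hp, ht, ih']
    | false => cases hp : p a <;> cases hq : q a <;> simp [hp, hq, ht, ih']

-- A's known-keys pass = the known-keys slice of B's single pass
theorem pvKnownEq (d : PySem.Dict String String) :
    (pvOrderedLit.filter (fun kl => pvT d kl.1)).map (fun kl => pvLine kl.2 (d.getD kl.1 ""))
      = (pvKeysLit.filter (pvT d)).map (fun k => pvLine (pvLabels.getD k k) (d.getD k "")) := by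
  have h1 : pvLabels.getD "run" "run" = "Run" := rfl
  have h2 : pvLabels.getD "test" "test" = "Test" := rfl
  have h3 : pvLabels.getD "build" "build" = "Build" := rfl
  have h4 : pvLabels.getD "configure" "configure" = "Configure" := rfl
  simp only [pvOrderedLit, pvKeysLit]
  cases ha : pvT d "run" <;> cases hb : pvT d "test" <;> cases hc : pvT d "build" <;>
    cases hd : pvT d "configure" <;>
    simp [ha, hb, hc, hd, h1, h2, h3, h4]

-- B's composite-key sort IS the single-key sort under the lexicographic pair order
theorem pvSorted2EqSortedLex {α : Type} (xs : List α) (k1 : α → Int) (k2 : α → String) :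
    PySem.List.sorted2 xs k1 k2 false
      = PySem.List.sorted xs (fun x => toLex (k1 x, k2 x)) false := by
  rw [PySem.List.sorted_eq_foldl_insertBy]
  have hbe : ∀ a b : α,
      (decide (k1 a < k1 b) || (!decide (k1 b < k1 a) && decide (k2 a < k2 b)))
        = decide (toLex (k1 a, k2 a) < toLex (k1 b, k2 b)) := by
    intro a b
    rcases lt_trichotomy (k1 a) (k1 b) with h | h | h
    · have hx : toLex (k1 a, k2 a) < toLex (k1 b, k2 b) := Prod.Lex.lt_iff.mpr (Or.inl h)
      simp [h, hx]
    · have hab : ¬ k1 a < k1 b := by rw [h]; exact lt_irrefl _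
      have hba : ¬ k1 b < k1 a := by rw [h]; exact lt_irrefl _
      by_cases h2 : k2 a < k2 b
      · have hx : toLex (k1 a, k2 a) < toLex (k1 b, k2 b) :=
          Prod.Lex.lt_iff.mpr (Or.inr ⟨h, h2⟩)
        simp [hab, hba, h2, hx]
      · have hx : ¬ toLex (k1 a, k2 a) < toLex (k1 b, k2 b) := by
          intro hc
          rcases Prod.Lex.lt_iff.mp hc with hc | ⟨_, hc⟩
          · exact hab hc
          · exact h2 (by simpa using hc)
        simp [hab, hba, h2, hx]
    · have hab : ¬ k1 a < k1 b := not_lt_of_gt h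
      have hx : ¬ toLex (k1 a, k2 a) < toLex (k1 b, k2 b) := by
        intro hc
        rcases Prod.Lex.lt_iff.mp hc with hc | ⟨hc, _⟩
        · exact hab hc
        · exact (ne_of_gt h) (by simpa using hc)
      simp [h, hab, hx]
  show List.foldl _ [] xs = _
  congr 1
  funext acc x
  congr 1
  funext a b
  exact hbe a b

theorem pvPrio_rest (k : String) (h : ¬ k ∈ pvKeysLit) : pvPrio k = 4 := by
  have hc : pvPriority.contains k = false := by
    rw [PySem.Dict.contains_eq_decide_mem_keys]
    have : pvPriority.keys = pvKeysLit := rfl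
    rw [this]
    simp [h]
  show pvPriority.getD k (PySem.List.len pvLabels.keys) = 4
  rw [PySem.Dict.getD_of_not_contains pvPriority _ hc]
  rfl

theorem pvLabels_contains_iff (k : String) :
    pvLabels.contains k = decide (k ∈ pvKeysLit) := by
  rw [PySem.Dict.contains_eq_decide_mem_keys]
  rfl

-- THE SPLIT: one sort under (priority, key) = known keys present (fixed order) ++ sorted rest
theorem pvSplit (d : PySem.Dict String String) (hnd : d.keys.Nodup) :
    PySem.List.sorted2 d.keys pvPrio (fun k => k) false
      = pvKeysLit.filter (fun k => d.contains k)
        ++ PySem.List.sorted (d.keys.filter (fun k => !(pvLabels.contains k))) (fun k => k) false := by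
  rw [pvSorted2EqSortedLex]
  apply PySem.List.sorted_eq_of_perm_of_pairwise_lt
  · -- permutation of d.keys
    refine List.Perm.trans (List.Perm.append ?_ ?_)
      (List.filter_append_perm (fun k => pvLabels.contains k) d.keys)
    · rw [List.perm_ext_iff_of_nodup
        ((by decide : pvKeysLit.Nodup).filter _) (hnd.filter _)]
      intro a
      simp only [List.mem_filter, PySem.Dict.contains_eq_decide_mem_keys, decide_eq_true_eq]
      tauto
    · exact PySem.List.sorted_perm _ _ _
  · -- strictly increasing under the lexicographic key
    rw [List.pairwise_append]
    refine ⟨?_, ?_, ?_⟩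
    · -- known part: priorities 0 < 1 < 2 < 3
      have hp : pvKeysLit.Pairwise
          (fun a b => toLex (pvPrio a, a) < toLex (pvPrio b, b)) := by decide
      exact hp.sublist List.filter_sublist
    · -- rest part: equal priority 4, strictly increasing keys
      have hle : (PySem.List.sorted (d.keys.filter (fun k => !(pvLabels.contains k)))
          (fun k => k) false).Pairwise (fun a b => a ≤ b) :=
        PySem.List.sorted_pairwise _ (fun k => k)
      have hnd2 : (PySem.List.sorted (d.keys.filter (fun k => !(pvLabels.contains k)))
          (fun k => k) false).Nodup :=
        (PySem.List.sorted_perm _ (fun k => k) false).symm.nodup (hnd.filter _)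
      have hlt : (PySem.List.sorted (d.keys.filter (fun k => !(pvLabels.contains k)))
          (fun k => k) false).Pairwise (fun a b => a < b) :=
        (hle.and hnd2).imp (fun h => lt_of_le_of_ne h.1 h.2)
      refine hlt.imp_of_mem ?_
      intro a b ha hb hab
      have ha4 : pvPrio a = 4 := by
        apply pvPrio_rest
        have := (List.mem_filter.mp ((PySem.List.mem_sorted _ _ _ _).mp ha)).2
        rw [pvLabels_contains_iff] at this
        simpa using this
      have hb4 : pvPrio b = 4 := by
        apply pvPrio_rest
        have := (List.mem_filter.mp ((PySem.List.mem_sorted _ _ _ _).mp hb)).2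
        rw [pvLabels_contains_iff] at this
        simpa using this
      apply Prod.Lex.lt_iff.mpr
      right
      exact ⟨by simp [ha4, hb4], by simpa using hab⟩
    · -- cross: known priorities ≤ 3 < 4 = rest priorities
      intro a ha b hb
      have ha' : a ∈ pvKeysLit := (List.mem_filter.mp ha).1
      have hb4 : pvPrio b = 4 := by
        apply pvPrio_rest
        have := (List.mem_filter.mp ((PySem.List.mem_sorted _ _ _ _).mp hb)).2
        rw [pvLabels_contains_iff] at this
        simpa using this
      apply Prod.Lex.lt_iff.mpr
      left
      rw [hb4]
      fin_cases ha' <;> simp <;> decide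
  
theorem render_commands_py_eq (commands : List (String × String)) :
    render_commands_py commands = render_commands_py_alt commands := by
  simp only [render_commands_py, render_commands_py_alt]
  rw [pvFoldA, pvRestStep, PySem.List.foldl_append_if]
  simp only [← pvOrderedLit_def, List.nil_append]
  set d := PySem.Dict.ofList commands with hd
  have hnd : d.keys.Nodup := PySem.Dict.nodup_keys_ofList commands
  rw [pvSplit d hnd]
  -- the rendered-keys set and the labels dict test the same keys on truthy input
  have hmem : ∀ k, pvT d k = true →
      ((fun k => !(PySem.Set.contains
          (pvOrderedLit.foldl (fun s kl => if pvT d kl.1 then PySem.Set.add s kl.1 else s)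
            PySem.Set.empty) k)) k
        = (fun k => !(PySem.Dict.contains pvLabels k)) k) := by
    intro k hk
    simp only
    congr 1
    have hmem2 : k ∈ pvOrderedLit.foldl
        (fun s kl => if pvT d kl.1 then PySem.Set.add s kl.1 else s) PySem.Set.empty
        ↔ k ∈ pvKeysLit := by
      rw [pvMemFoldSet]
      constructor
      · rintro (h | ⟨kl, hkl, _, rfl⟩)
        · simp [PySem.Set.empty] at h
        · fin_cases hkl <;> simp [pvKeysLit]
      · intro h
        refine Or.inr ?_
        fin_cases h
        · exact ⟨("run", "Run"), by simp [pvOrderedLit], hk, rfl⟩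
        · exact ⟨("test", "Test"), by simp [pvOrderedLit], hk, rfl⟩
        · exact ⟨("build", "Build"), by simp [pvOrderedLit], hk, rfl⟩
        · exact ⟨("configure", "Configure"), by simp [pvOrderedLit], hk, rfl⟩
    by_cases hkk : k ∈ pvKeysLit
    · rw [pvLabels_contains_iff]
      rw [(PySem.Set.contains_iff _ k).mpr (hmem2.mpr hkk)]
      simp [hkk]
    · rw [pvLabels_contains_iff]
      have : ¬ (k ∈ pvOrderedLit.foldl
          (fun s kl => if pvT d kl.1 then PySem.Set.add s kl.1 else s) PySem.Set.empty) :=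
        fun hcon => hkk (hmem2.mp hcon)
      have hfalse : PySem.Set.contains
          (pvOrderedLit.foldl (fun s kl => if pvT d kl.1 then PySem.Set.add s kl.1 else s)
            PySem.Set.empty) k = false := by
        cases hcc : PySem.Set.contains _ k
        · rfl
        · exact absurd ((PySem.Set.contains_iff _ k).mp hcc) this
      rw [hfalse]
      simp [hkk]
  -- the line lists of A and B coincide
  have hlines :
      (pvOrderedLit.filter (fun kl => pvT d kl.1)).map (fun kl => pvLine kl.2 (d.getD kl.1 ""))
        ++ ((PySem.List.sorted (d.keys.filter (fun k => !(PySem.Set.contains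
              (pvOrderedLit.foldl (fun s kl => if pvT d kl.1 then PySem.Set.add s kl.1 else s)
                PySem.Set.empty) k))) (fun k => k) false).filter (pvT d)).map
            (fun k => pvLine k (d.getD k ""))
      = (((pvKeysLit.filter (fun k => d.contains k)
            ++ PySem.List.sorted (d.keys.filter (fun k => !(pvLabels.contains k))) (fun k => k) false).filter
              (fun k => !(d.getD k "" == ""))).map
          (fun k => pvLine (pvLabels.getD k k) (d.getD k ""))) := by
    rw [List.filter_append, List.map_append]
    congr 1
    · -- known part
      rw [show (fun k => !(d.getD k "" == "")) = pvT d from rfl]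
      rw [pvFilterOfImp pvKeysLit (fun k => d.contains k) (pvT d) (pvT_contains d)]
      exact pvKnownEq d
    · -- rest part
      rw [pvSortedFilter _ _ hnd, pvSortedFilter _ _ hnd]
      rw [show (fun k => !(d.getD k "" == "")) = pvT d from rfl]
      rw [pvFilterFilterCongr _ _ _ _ (fun k _ hk => hmem k hk)]
      apply List.map_congr_left
      intro k hk
      have hkf := (List.mem_filter.mp ((List.mem_filter.mp hk).1)).2
      have hcf : pvLabels.contains k = false := by
        cases hc : pvLabels.contains k
        · rfl
        · rw [hc] at hkf; simp at hkf
      rw [PySem.Dict.getD_of_not_contains pvLabels k hcf]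
  rw [hlines, pvFinish]

-- ===== VERDICT (by name: the statement is the Claim_ definition above) =====
theorem render_commands_py_spec : Claim_equal_render_commands_py := by
  intro commands _
  unfold Spec_render_commands_py
  exact render_commands_py_eq commands
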